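-- pv_equiv track=rewrite | github.com/febos/SQUARNA | SQRNdbnali.py | ReAlignDict
-- ===== SOURCE A (Python) =====
-- def ReAlignDict(shortseq, longseq):
--     """ Return the dictionary between unaligned and realigned indices"""
--
--     dct = {}
--
--     i1, i2 = 0, 0
--
--     while i1 < len(shortseq):
--
--         if longseq[i2] in ('.','-','~'):
--             i2 += 1
--         else:
--             dct[i1] = i2
--             i1 += 1
--             i2 += 1
--
--     return dct
-- ===== SOURCE B (Python) =====
-- def ReAlignDict(shortseq, longseq):
--     """ Return the dictionary between unaligned and realigned indices"""
--     positions = [i for i, c in enumerate(longseq) if c not in ('.', '-', '~')]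
--     return {k: positions[k] for k in range(len(shortseq))}
-- ===== Notes on version B (the rewrite author's own statement) =====
-- stated objective: idiomatic
-- what changed: Replaces the stateful two-pointer while loop by first building the table of non-gap positions of longseq with one comprehension and then mapping each short index to its table entry with a dict comprehension.
import Mathlib
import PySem

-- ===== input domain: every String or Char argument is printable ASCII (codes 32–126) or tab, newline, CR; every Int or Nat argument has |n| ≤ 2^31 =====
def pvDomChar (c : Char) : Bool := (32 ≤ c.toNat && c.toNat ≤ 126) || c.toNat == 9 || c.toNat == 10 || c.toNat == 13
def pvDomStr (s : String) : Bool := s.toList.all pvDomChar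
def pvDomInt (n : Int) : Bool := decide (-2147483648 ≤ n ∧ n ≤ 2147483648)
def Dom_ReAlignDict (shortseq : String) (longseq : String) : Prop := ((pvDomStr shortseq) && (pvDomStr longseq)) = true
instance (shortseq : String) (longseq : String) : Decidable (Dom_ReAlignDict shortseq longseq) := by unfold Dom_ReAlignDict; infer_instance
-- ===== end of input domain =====

-- B replaces A's stateful two-pointer while loop by a precomputed non-gap-position table
-- indexed by a comprehension (idiomatic; same cost). Proven equal wherever A returns.

-- ===== PORT A =====
-- the tuple-membership test `c in ('.','-','~')`, shared by both Pythons verbatim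
def pvGap (c : Char) : Bool := c == '.' || c == '-' || c == '~'

-- A's while loop; `longseq[i2]` via pyGet? (i2 is a nonneg counter); none = IndexError (excluded by Pre_)
def pvLoopA (ls : List Char) (n : Nat) (i1 i2 : Nat) (dct : PySem.Dict Int Int) : PySem.Dict Int Int :=
  if i1 < n then
    match h2 : PySem.List.pyGet? ls (i2 : Int) with
    | none => dct  -- Python raises IndexError here; unreachable inside Pre_
    | some c =>
      if pvGap c then pvLoopA ls n i1 (i2 + 1) dct
      else pvLoopA ls n (i1 + 1) (i2 + 1) (dct.insert (i1 : Int) (i2 : Int))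
  else dct
termination_by ls.length - i2
decreasing_by
  all_goals
    rw [PySem.List.pyGet?_natCast] at h2
    obtain ⟨hlt, -⟩ := List.getElem?_eq_some_iff.mp h2
    omega

def ReAlignDict (shortseq : String) (longseq : String) : List (Int × Int) :=
  (pvLoopA longseq.toList shortseq.toList.length 0 0 PySem.Dict.empty).items

-- ===== PORT B =====
def ReAlignDict_alt (shortseq : String) (longseq : String) : List (Int × Int) :=
  let positions : List Int :=
    ((PySem.List.enumerate longseq.toList 0).filter (fun p => !pvGap p.2)).map (·.1)
  -- range(len(shortseq)) with a nonnegative bound is exactly 0,…,len-1; positions[k] via pyGet?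
  (List.range shortseq.toList.length).map
    (fun k : Nat => ((k : Int), (PySem.List.pyGet? positions (k : Int)).getD 0))

-- ===== PRECONDITION & SPEC =====
-- Pre_ excludes exactly the inputs where A raises IndexError: longseq has fewer
-- non-gap characters than len(shortseq) (B raises IndexError there too).
def Pre_ReAlignDict (shortseq : String) (longseq : String) : Prop :=
  shortseq.toList.length ≤ (longseq.toList.filter (fun c => !pvGap c)).length
instance (shortseq : String) (longseq : String) : Decidable (Pre_ReAlignDict shortseq longseq) := by
  unfold Pre_ReAlignDict; infer_instance
def pvWitness_ReAlignDict : String × String := ("AC", "A-.C~G")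

def Spec_ReAlignDict (shortseq : String) (longseq : String) (out : List (Int × Int)) : Prop := out = ReAlignDict_alt shortseq longseq
instance (shortseq : String) (longseq : String) (out : List (Int × Int)) : Decidable (Spec_ReAlignDict shortseq longseq out) := by unfold Spec_ReAlignDict; infer_instance

-- ===== CLAIM (what is proved, stated in full; the proofs are below) =====
def Claim_equal_ReAlignDict : Prop := ∀ (shortseq : String) (longseq : String), Dom_ReAlignDict shortseq longseq → Pre_ReAlignDict shortseq longseq → Spec_ReAlignDict shortseq longseq (ReAlignDict shortseq longseq)

-- ===== LEMMAS AND PROOFS =====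

-- proof helper: the pairs A's loop appends, as structural recursion on the unread suffix of longseq
def pvBuild (cs : List Char) (i1 i2 n : Nat) : List (Int × Int) :=
  match cs with
  | [] => []
  | c :: rest =>
    if i1 < n then
      if pvGap c then pvBuild rest i1 (i2 + 1) n
      else ((i1 : Int), (i2 : Int)) :: pvBuild rest (i1 + 1) (i2 + 1) n
    else []

-- proof helper: indices of the non-gap characters of cs
def pvPos (cs : List Char) : List Nat :=
  match cs with
  | [] => []
  | c :: rest =>
    if pvGap c then (pvPos rest).map (· + 1)
    else 0 :: (pvPos rest).map (· + 1)

theorem pvBuild_of_ge (cs : List Char) (i1 i2 n : Nat) (h : ¬ i1 < n) :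
    pvBuild cs i1 i2 n = [] := by
  cases cs <;> simp [pvBuild, h]

theorem pvLoopA_items (ls : List Char) (n : Nat) :
    ∀ (i1 i2 : Nat) (dct : PySem.Dict Int Int), (∀ k ∈ dct.keys, k < (i1 : Int)) →
      (pvLoopA ls n i1 i2 dct).items = dct.items ++ pvBuild (ls.drop i2) i1 i2 n := by
  intro i1 i2 dct
  induction i1, i2, dct using pvLoopA.induct ls n with
  | case1 i1 i2 dct h1 h2 =>
    intro _
    rw [pvLoopA]
    simp only [h1, if_true]
    split
    · next heq =>
      rw [PySem.List.pyGet?_natCast] at heq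
      rw [List.drop_eq_nil_of_le (List.getElem?_eq_none_iff.mp heq)]
      simp [pvBuild]
    · next c' heq => rw [heq] at h2; cases h2
  | case2 i1 i2 dct h1 c h2 hg ih =>
    intro hkeys
    rw [pvLoopA]
    simp only [h1, if_true]
    split
    · next heq => rw [heq] at h2; cases h2
    · next c' heq =>
      rw [heq] at h2
      injection h2 with h2; subst h2
      simp only [hg, if_true]
      rw [ih hkeys]
      rw [PySem.List.pyGet?_natCast] at heq
      obtain ⟨hi2, hc⟩ := List.getElem?_eq_some_iff.mp heq
      rw [List.drop_eq_getElem_cons hi2, hc]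
      simp [pvBuild, h1, hg]
  | case3 i1 i2 dct h1 c h2 hg ih =>
    intro hkeys
    rw [pvLoopA]
    simp only [h1, if_true]
    split
    · next heq => rw [heq] at h2; cases h2
    · next c' heq =>
      rw [heq] at h2
      injection h2 with h2; subst h2
      simp only [hg, Bool.false_eq_true, if_false]
      have hnc : dct.contains (i1 : Int) = false := by
        cases hx : dct.contains (i1 : Int)
        · rfl
        · have := hkeys _ ((PySem.Dict.contains_iff_mem_keys _ _).mp hx)
          exact absurd this (lt_irrefl _)
      have hkeys' : ∀ k ∈ (dct.insert (i1 : Int) (i2 : Int)).keys, k < ((i1 + 1 : Nat) : Int) := by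
        intro k hk
        rcases (PySem.Dict.mem_keys_insert _ _ _ _).mp hk with h | h
        · subst h; push_cast; omega
        · have := hkeys _ h; push_cast; omega
      rw [ih hkeys', PySem.Dict.items_insert_of_not_contains _ _ hnc]
      rw [PySem.List.pyGet?_natCast] at heq
      obtain ⟨hi2, hc⟩ := List.getElem?_eq_some_iff.mp heq
      rw [List.drop_eq_getElem_cons hi2, hc]
      simp [pvBuild, h1, hg]
  | case4 i1 i2 dct h1 =>
    intro _
    rw [pvLoopA]
    simp only [h1, if_false]
    rw [pvBuild_of_ge _ _ _ _ h1]
    simp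

theorem pvPos_length (cs : List Char) :
    (pvPos cs).length = (cs.filter (fun c => !pvGap c)).length := by
  induction cs with
  | nil => simp [pvPos]
  | cons c rest ih =>
    by_cases hg : pvGap c <;> simp [pvPos, hg, ih]

theorem pvBuild_eq (cs : List Char) :
    ∀ i1 i2 n, n - i1 ≤ (pvPos cs).length →
      pvBuild cs i1 i2 n = (List.range (n - i1)).map
        (fun k => (((i1 + k : Nat) : Int), ((i2 + (pvPos cs).getD k 0 : Nat) : Int))) := by
  induction cs with
  | nil =>
    intro i1 i2 n h
    simp [pvPos] at h
    simp [pvBuild, show n - i1 = 0 by omega]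
  | cons c rest ih =>
    intro i1 i2 n h
    by_cases h1 : i1 < n
    · cases hg : pvGap c with
      | true =>
        simp only [pvPos, hg, if_true] at h ⊢
        rw [List.length_map] at h
        simp only [pvBuild, h1, if_true, hg]
        rw [ih i1 (i2 + 1) n h]
        apply List.map_congr_left
        intro k hk
        rw [List.mem_range] at hk
        have hklt : k < (pvPos rest).length := by omega
        have hgd : ((pvPos rest).map (· + 1)).getD k 0 = (pvPos rest).getD k 0 + 1 := by
          rw [List.getD_eq_getElem?_getD, List.getD_eq_getElem?_getD,
              List.getElem?_map, List.getElem?_eq_getElem hklt]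
          simp
        rw [hgd]
        simp only [Prod.mk.injEq]
        refine ⟨by trivial, by push_cast; ring⟩
      | false =>
        simp only [pvPos, hg, Bool.false_eq_true, if_false] at h ⊢
        simp only [List.length_cons, List.length_map] at h
        simp only [pvBuild, h1, if_true, hg, Bool.false_eq_true, if_false]
        have hn : n - i1 = (n - (i1 + 1)) + 1 := by omega
        rw [ih (i1 + 1) (i2 + 1) n (by omega), hn, List.range_succ_eq_map]
        simp only [List.map_cons, List.map_map, List.cons.injEq]
        refine ⟨by simp, ?_⟩
        apply List.map_congr_left
        intro k hk
        rw [List.mem_range] at hk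
        have hklt : k < (pvPos rest).length := by omega
        have hgd : ((pvPos rest).map (· + 1)).getD k 0 = (pvPos rest).getD k 0 + 1 := by
          rw [List.getD_eq_getElem?_getD, List.getD_eq_getElem?_getD,
              List.getElem?_map, List.getElem?_eq_getElem hklt]
          simp
        simp only [Function.comp, List.getD_cons_succ, hgd, Prod.mk.injEq]
        refine ⟨by push_cast; ring, by push_cast; ring⟩
    · rw [pvBuild_of_ge _ _ _ _ h1, show n - i1 = 0 by omega]
      simp

theorem pvPositions_eq (ls : List Char) :
    ∀ s : Int, ((PySem.List.enumerate ls s).filter (fun p => !pvGap p.2)).map (·.1)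
      = (pvPos ls).map (fun p : Nat => s + (p : Int)) := by
  induction ls with
  | nil => intro s; simp [PySem.List.enumerate_nil, pvPos]
  | cons c rest ih =>
    intro s
    rw [PySem.List.enumerate_cons]
    cases hg : pvGap c with
    | true =>
      simp only [List.filter_cons, hg, Bool.not_true, Bool.false_eq_true, if_false,
        ih (s + 1), pvPos, if_true, List.map_map]
      apply List.map_congr_left
      intro p _
      simp only [Function.comp_apply]
      push_cast; ring
    | false =>
      simp only [List.filter_cons, hg, Bool.not_false, if_true, List.map_cons,
        ih (s + 1), pvPos, Bool.false_eq_true, if_false, List.map_map, List.cons.injEq]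
      refine ⟨by simp, ?_⟩
      apply List.map_congr_left
      intro p _
      simp only [Function.comp_apply]
      push_cast; ring

-- ===== VERDICT (by name: the statement is the Claim_ definition above) =====
theorem ReAlignDict_spec : Claim_equal_ReAlignDict := by
  intro shortseq longseq _ hpre
  unfold Spec_ReAlignDict ReAlignDict ReAlignDict_alt
  set ls := longseq.toList with hls
  set n := shortseq.toList.length with hn
  have hpre' : n ≤ (pvPos ls).length := by
    rw [pvPos_length]; exact hpre
  rw [pvLoopA_items ls n 0 0 PySem.Dict.empty (by simp)]
  simp only [List.drop_zero]
  rw [pvBuild_eq ls 0 0 n (by omega)]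
  have hposn : ((PySem.List.enumerate ls 0).filter (fun p => !pvGap p.2)).map (·.1)
      = (pvPos ls).map (fun p : Nat => (p : Int)) := by
    rw [pvPositions_eq ls 0]
    simp
  have hempty : (PySem.Dict.empty : PySem.Dict Int Int).items = [] := rfl
  rw [hempty, List.nil_append, hposn]
  apply List.map_congr_left
  intro k hk
  rw [List.mem_range] at hk
  have hklt : k < (pvPos ls).length := by omega
  rw [PySem.List.pyGet?_natCast, List.getElem?_map, List.getElem?_eq_getElem hklt]
  simp only [Option.map_some, Option.getD_some]
  refine Prod.ext (by simp) ?_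
  rw [List.getD_eq_getElem?_getD, List.getElem?_eq_getElem hklt]
  simp
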